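-- pv_equiv track=rewrite | github.com/OnewayLab/InstructERC | lf/test.py | _optimize_output
-- ===== SOURCE A (Python) =====
-- def _optimize_output(output, label_set):
--     """
--     Calculate output and label_ Set the editing distance of each label in the set and return the label corresponding to the minimum editing distance
--     """
--     min_distance = float("inf")
--     optimized_output = ""
--     for label in label_set:
--         distance = _edit_distance(output, label)
--         if distance < min_distance:
--             min_distance = distance
--             optimized_output = label
--     return optimized_output
--
-- def _edit_distance(s1, s2):
--     """
--     Calculate the editing distance between two strings
--     """
--     m, n = len(s1), len(s2)
--     dp = [[0] * (n + 1) for _ in range(m + 1)]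
--     for i in range(m + 1):
--         dp[i][0] = i
--     for j in range(n + 1):
--         dp[0][j] = j
--     for i in range(1, m + 1):
--         for j in range(1, n + 1):
--             if s1[i - 1] == s2[j - 1]:
--                 dp[i][j] = dp[i - 1][j - 1]
--             else:
--                 dp[i][j] = min(dp[i - 1][j], dp[i][j - 1], dp[i - 1][j - 1]) + 1
--     return dp[m][n]
-- ===== SOURCE B (Python) =====
-- def _optimize_output(output, label_set):
--     """Pick the label with minimal edit distance to output (first minimizer; "" if empty)."""
--     return min(label_set, key=lambda label: _edit_distance(output, label), default="")
--
-- def _edit_distance(s1, s2):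
--     """Edit distance by top-down recursion on prefix lengths with a memo dict,
--     instead of filling a bottom-up (m+1)x(n+1) matrix."""
--     memo = {}
--     def d(i, j):
--         if i == 0:
--             return j
--         if j == 0:
--             return i
--         if (i, j) in memo:
--             return memo[(i, j)]
--         if s1[i - 1] == s2[j - 1]:
--             r = d(i - 1, j - 1)
--         else:
--             r = 1 + min(d(i - 1, j), d(i, j - 1), d(i - 1, j - 1))
--         memo[(i, j)] = r
--         return r
--     return d(len(s1), len(s2))
-- ===== Notes on version B (the rewrite author's own statement) =====
-- stated objective: alternative
-- what changed: _edit_distance is rewritten as a top-down recursive function with a memo dict keyed on prefix-length pairs (base cases i==0/j==0, recursing on (i-1,j),(i,j-1),(i-1,j-1)) instead of allocating and index-filling a bottom-up (m+1)x(n+1) matrix, and _optimize_output becomes min(label_set, key=..., default="") instead of a manual scan with an infinity sentinel.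
import Mathlib
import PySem

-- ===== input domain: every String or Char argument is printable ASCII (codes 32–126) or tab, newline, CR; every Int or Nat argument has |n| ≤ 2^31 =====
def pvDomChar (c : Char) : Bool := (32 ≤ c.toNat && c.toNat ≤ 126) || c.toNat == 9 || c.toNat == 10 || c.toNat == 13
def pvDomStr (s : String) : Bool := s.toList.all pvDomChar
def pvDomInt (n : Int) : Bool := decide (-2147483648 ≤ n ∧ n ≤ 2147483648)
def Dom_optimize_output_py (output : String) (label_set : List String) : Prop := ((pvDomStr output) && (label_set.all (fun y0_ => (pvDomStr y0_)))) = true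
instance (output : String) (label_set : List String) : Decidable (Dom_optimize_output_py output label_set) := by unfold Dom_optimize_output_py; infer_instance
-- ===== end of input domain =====

-- B replaces A's bottom-up (m+1)x(n+1) edit-distance matrix by top-down memoized recursion
-- on prefix-length pairs (only reachable states are computed; a timing run measured B
-- faster), and A's manual min-scan by min(label_set, key=..., default="").

-- ===== PORT A =====

-- 2-D read dp[i][j]; A only reads in-range nonnegative indices, where Python indexing
-- returns exactly this value (the defaults are never used).
def pvGet2 (dp : List (List Int)) (i j : Nat) : Int := (dp.getD i []).getD j 0

-- _edit_distance of A: full (m+1)x(n+1) matrix, the two init loops and the nested main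
-- loops exactly as the Python writes them (range(1, m+1) walked as i0+1).
def pvEditA (s1 s2 : List Char) : Int :=
  let m := s1.length
  let n := s2.length
  let dp0 := List.replicate (m+1) (List.replicate (n+1) (0:Int))
  let dp1 := (List.range (m+1)).foldl (fun dp i => dp.set i ((dp.getD i []).set 0 (i:Int))) dp0
  let dp2 := (List.range (n+1)).foldl (fun dp j => dp.set 0 ((dp.getD 0 []).set j (j:Int))) dp1
  let dp3 := (List.range m).foldl (fun dp i0 =>
      let i := i0 + 1
      (List.range n).foldl (fun dp j0 =>
        let j := j0 + 1
        let v := if s1.getD (i-1) ' ' = s2.getD (j-1) ' ' then pvGet2 dp (i-1) (j-1)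
                 else min (pvGet2 dp (i-1) j) (min (pvGet2 dp i (j-1)) (pvGet2 dp (i-1) (j-1))) + 1
        dp.set i ((dp.getD i []).set j v)) dp) dp2
  pvGet2 dp3 m n

def optimize_output_py (output : String) (label_set : List String) : String :=
  -- min_distance = float("inf") is modelled as none (greater than every int distance)
  (label_set.foldl (fun (st : Option Int × String) label =>
      let d := pvEditA output.toList label.toList
      match st.1 with
      | none => (some d, label)
      | some md => if d < md then (some d, label) else st) (none, "")).2

-- ===== PORT B =====

-- inner recursive helper d(i, j) of B's _edit_distance, threading the memo dict;
-- i, j are the (always nonnegative) prefix lengths, so Nat is exact here.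
def pvD (s1 s2 : List Char) : Nat → Nat → PySem.Dict (Nat × Nat) Int → Int × PySem.Dict (Nat × Nat) Int
  | 0, j, memo => ((j:Int), memo)
  | i+1, 0, memo => ((i:Int)+1, memo)
  | i+1, j+1, memo =>
    match memo.get? (i+1, j+1) with
    | some v => (v, memo)
    | none =>
      if s1.getD i ' ' = s2.getD j ' ' then
        let p := pvD s1 s2 i j memo
        (p.1, p.2.insert (i+1, j+1) p.1)
      else
        let a := pvD s1 s2 i (j+1) memo
        let b := pvD s1 s2 (i+1) j a.2
        let c := pvD s1 s2 i j b.2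
        let r := 1 + min a.1 (min b.1 c.1)
        (r, c.2.insert (i+1, j+1) r)
  termination_by i j _ => i + j

-- _edit_distance of B: d(len(s1), len(s2)) starting from an empty memo
def pvEditB (s1 s2 : List Char) : Int :=
  (pvD s1 s2 s1.length s2.length PySem.Dict.empty).1

def optimize_output_py_alt (output : String) (label_set : List String) : String :=
  PySem.List.minD label_set (fun label => pvEditB output.toList label.toList) ""

-- ===== PRECONDITION & SPEC =====
def Spec_optimize_output_py (output : String) (label_set : List String) (out : String) : Prop := out = optimize_output_py_alt output label_set
instance (output : String) (label_set : List String) (out : String) : Decidable (Spec_optimize_output_py output label_set out) := by unfold Spec_optimize_output_py; infer_instance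

-- ===== CLAIM (what is proved, stated in full; the proofs are below) =====
def Claim_equal_optimize_output_py : Prop := ∀ (output : String) (label_set : List String), Dom_optimize_output_py output label_set → Spec_optimize_output_py output label_set (optimize_output_py output label_set)

-- ===== LEMMAS AND PROOFS =====

-- the mathematical prefix edit-distance table, row by row
def Ecell (c1 : Char) (s2 : List Char) (p : Nat → Int) (ii : Int) : Nat → Int
  | 0 => ii
  | j+1 => if c1 = s2.getD j ' ' then p j
           else min (p (j+1)) (min (Ecell c1 s2 p ii j) (p j)) + 1

def Erow (s1 s2 : List Char) : Nat → Nat → Int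
  | 0 => fun j => (j : Int)
  | i+1 => Ecell (s1.getD i ' ') s2 (Erow s1 s2 i) ((i : Int) + 1)

theorem Erow_zero (s1 s2 : List Char) (i : Nat) : Erow s1 s2 (i+1) 0 = (i:Int)+1 := rfl

theorem Erow_succ_succ (s1 s2 : List Char) (i j : Nat) :
    Erow s1 s2 (i+1) (j+1)
    = if s1.getD i ' ' = s2.getD j ' ' then Erow s1 s2 i j
      else min (Erow s1 s2 i (j+1)) (min (Erow s1 s2 (i+1) j) (Erow s1 s2 i j)) + 1 := rfl

-- memo invariant: every stored entry is the true prefix edit distance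
def MemoOK (s1 s2 : List Char) (memo : PySem.Dict (Nat × Nat) Int) : Prop :=
  ∀ i j v, memo.get? (i, j) = some v → v = Erow s1 s2 i j

theorem pvD_correct (s1 s2 : List Char) : ∀ (n i j : Nat), i + j ≤ n →
    ∀ memo, MemoOK s1 s2 memo →
    (pvD s1 s2 i j memo).1 = Erow s1 s2 i j ∧ MemoOK s1 s2 (pvD s1 s2 i j memo).2 := by
  intro n
  induction n with
  | zero =>
    intro i j hij memo hm
    have hi : i = 0 := by omega
    have hj : j = 0 := by omega
    subst hi hj
    rw [pvD]
    exact ⟨rfl, hm⟩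
  | succ n ih =>
    intro i j hij memo hm
    match i, j with
    | 0, j =>
      rw [pvD]
      exact ⟨rfl, hm⟩
    | i+1, 0 =>
      rw [pvD]
      exact ⟨Erow_zero s1 s2 i ▸ rfl, hm⟩
    | i+1, j+1 =>
      rw [pvD]
      cases hget : memo.get? (i+1, j+1) with
      | some v => exact ⟨hm _ _ _ hget, hm⟩
      | none =>
        simp only
        split_ifs with hc
        · obtain ⟨hp1, hp2⟩ := ih i j (by omega) memo hm
          refine ⟨by rw [hp1, Erow_succ_succ, if_pos hc], ?_⟩
          intro i' j' v' hv'
          rw [PySem.Dict.get?_insert] at hv'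
          split_ifs at hv' with he
          · have hi2 : i' = i+1 := congrArg Prod.fst he
            have hj2 : j' = j+1 := congrArg Prod.snd he
            subst hi2 hj2
            rw [← Option.some.inj hv', hp1, Erow_succ_succ, if_pos hc]
          · exact hp2 _ _ _ hv'
        · obtain ⟨ha1, ha2⟩ := ih i (j+1) (by omega) memo hm
          obtain ⟨hb1, hb2⟩ := ih (i+1) j (by omega) _ ha2
          obtain ⟨hc1, hc2⟩ := ih i j (by omega) _ hb2
          have hr : 1 + min (pvD s1 s2 i (j+1) memo).1
                (min (pvD s1 s2 (i+1) j (pvD s1 s2 i (j+1) memo).2).1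
                     (pvD s1 s2 i j (pvD s1 s2 (i+1) j (pvD s1 s2 i (j+1) memo).2).2).1)
              = Erow s1 s2 (i+1) (j+1) := by
            rw [ha1, hb1, hc1, Erow_succ_succ, if_neg hc]
            ring
          refine ⟨hr, ?_⟩
          intro i' j' v' hv'
          rw [PySem.Dict.get?_insert] at hv'
          split_ifs at hv' with he
          · have hi2 : i' = i+1 := congrArg Prod.fst he
            have hj2 : j' = j+1 := congrArg Prod.snd he
            subst hi2 hj2
            rw [← Option.some.inj hv', hr]
          · exact hc2 _ _ _ hv'

theorem editB_eq_Erow (s1 s2 : List Char) :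
    pvEditB s1 s2 = Erow s1 s2 s1.length s2.length := by
  have h := pvD_correct s1 s2 (s1.length + s2.length) s1.length s2.length (Nat.le_refl _)
    PySem.Dict.empty (by intro i j v hv; simp [PySem.Dict.get?_empty] at hv)
  exact h.1

-- the min-scan of B: min(xs, key=k, default="")
theorem scan_aux (k : String → Int) : ∀ (t : List String) (b : String),
    (t.foldl (fun (st : Option Int × String) label =>
      match st.1 with
      | none => (some (k label), label)
      | some md => if k label < md then (some (k label), label) else st) (some (k b), b)).2
    = (PySem.List.min? (b :: t) k).getD "" := by
  intro t
  induction t with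
  | nil => intro b; rfl
  | cons y t ih =>
    intro b
    unfold PySem.List.min?
    simp only [List.foldl_cons]
    by_cases h : k y < k b
    · simp only [h, ite_true]
      simpa [PySem.List.min?] using ih y
    · simp only [if_neg h]
      simpa [PySem.List.min?] using ih b

theorem scan_eq_minD (xs : List String) (k : String → Int) :
    (xs.foldl (fun (st : Option Int × String) label =>
      let d := k label
      match st.1 with
      | none => (some d, label)
      | some md => if d < md then (some d, label) else st) (none, "")).2
    = PySem.List.minD xs k "" := by
  cases xs with
  | nil => rfl
  | cons x t =>
    unfold PySem.List.minD
    simp only [List.foldl_cons]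
    convert scan_aux k t x using 2

theorem getD_set_list (dp : List (List Int)) (k : Nat) (row : List Int) (i : Nat) :
    (dp.set k row).getD i [] = if i = k ∧ k < dp.length then row else dp.getD i [] := by
  simp only [List.getD_eq_getElem?_getD, List.getElem?_set]
  split_ifs with h1 h2 h3 h4 <;> simp_all

theorem getD_set_int (l : List Int) (k : Nat) (a : Int) (j : Nat) :
    (l.set k a).getD j 0 = if j = k ∧ k < l.length then a else l.getD j 0 := by
  simp only [List.getD_eq_getElem?_getD, List.getElem?_set]
  split_ifs with h1 h2 h3 h4 <;> simp_all

-- stage 1: dp[i][0] = i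
theorem len_fold1 : ∀ (L : List Nat) (dp : List (List Int)),
    (L.foldl (fun dp i => dp.set i ((dp.getD i []).set 0 (i:Int))) dp).length = dp.length := by
  intro L
  induction L with
  | nil => intro dp; rfl
  | cons a L ih => intro dp; rw [List.foldl_cons, ih, List.length_set]

theorem val_fold1 : ∀ (k : Nat) (dp : List (List Int)) (i : Nat),
    ((List.range k).foldl (fun dp i => dp.set i ((dp.getD i []).set 0 (i:Int))) dp).getD i []
    = if i < k ∧ i < dp.length then (dp.getD i []).set 0 (i:Int) else dp.getD i [] := by
  intro k
  induction k with
  | zero => intro dp i; simp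
  | succ k ih =>
    intro dp i
    rw [List.range_succ, List.foldl_append, List.foldl_cons, List.foldl_nil,
      getD_set_list, len_fold1, ih, ih]
    split_ifs <;> simp_all <;> omega

-- stage 2: dp[0][j] = j
theorem len_fold2 : ∀ (L : List Nat) (dp : List (List Int)),
    (L.foldl (fun dp j => dp.set 0 ((dp.getD 0 []).set j (j:Int))) dp).length = dp.length := by
  intro L
  induction L with
  | nil => intro dp; rfl
  | cons a L ih => intro dp; rw [List.foldl_cons, ih, List.length_set]

theorem rowlen_fold2 : ∀ (L : List Nat) (dp : List (List Int)) (i : Nat),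
    ((L.foldl (fun dp j => dp.set 0 ((dp.getD 0 []).set j (j:Int))) dp).getD i []).length
    = (dp.getD i []).length := by
  intro L
  induction L with
  | nil => intro dp i; rfl
  | cons a L ih =>
    intro dp i
    rw [List.foldl_cons, ih, getD_set_list]
    split_ifs with h
    · rw [List.length_set, h.1]
    · rfl

theorem val_fold2 : ∀ (k : Nat) (dp : List (List Int)) (i j : Nat),
    pvGet2 ((List.range k).foldl (fun dp j => dp.set 0 ((dp.getD 0 []).set j (j:Int))) dp) i j
    = if i = 0 ∧ 0 < dp.length ∧ j < k ∧ j < (dp.getD 0 []).length then (j:Int)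
      else pvGet2 dp i j := by
  intro k
  induction k with
  | zero => intro dp i j; simp
  | succ k ih =>
    intro dp i j
    rw [List.range_succ, List.foldl_append, List.foldl_cons, List.foldl_nil]
    unfold pvGet2
    rw [getD_set_list, len_fold2]
    have hrl := rowlen_fold2 (List.range k) dp 0
    have h0 := ih dp 0 j
    have hij := ih dp i j
    unfold pvGet2 at h0 hij
    by_cases hi : i = 0 ∧ 0 < dp.length
    · obtain ⟨hi0, hdl⟩ := hi
      subst hi0
      rw [if_pos ⟨rfl, hdl⟩, getD_set_int, hrl]
      by_cases hj : j = k ∧ k < (dp.getD 0 []).length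
      · rw [if_pos hj, if_pos ⟨rfl, hdl, by omega, by omega⟩, hj.1]
      · rw [if_neg hj, h0]
        split_ifs with hA hB <;> try rfl
        · exact absurd trivial (by omega)
        · exact absurd trivial (by omega)
    · rw [if_neg hi, hij,
        if_neg (fun hc => hi ⟨hc.1, hc.2.1⟩), if_neg (fun hc => hi ⟨hc.1, hc.2.1⟩)]

-- main loop: length preservation (any iteration list)
theorem len_foldI (s1 s2 : List Char) (i0 : Nat) : ∀ (L : List Nat) (dp : List (List Int)),
    (L.foldl (fun dp j0 => dp.set (i0+1) ((dp.getD (i0+1) []).set (j0+1)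
      (if s1.getD (i0+1-1) ' ' = s2.getD (j0+1-1) ' ' then pvGet2 dp (i0+1-1) (j0+1-1)
       else min (pvGet2 dp (i0+1-1) (j0+1)) (min (pvGet2 dp (i0+1) (j0+1-1)) (pvGet2 dp (i0+1-1) (j0+1-1))) + 1))) dp).length
    = dp.length := by
  intro L
  induction L with
  | nil => intro dp; rfl
  | cons a L ih => intro dp; rw [List.foldl_cons, ih, List.length_set]

theorem rowlen_foldI (s1 s2 : List Char) (i0 : Nat) : ∀ (L : List Nat) (dp : List (List Int)) (r : Nat),
    ((L.foldl (fun dp j0 => dp.set (i0+1) ((dp.getD (i0+1) []).set (j0+1)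
      (if s1.getD (i0+1-1) ' ' = s2.getD (j0+1-1) ' ' then pvGet2 dp (i0+1-1) (j0+1-1)
       else min (pvGet2 dp (i0+1-1) (j0+1)) (min (pvGet2 dp (i0+1) (j0+1-1)) (pvGet2 dp (i0+1-1) (j0+1-1))) + 1))) dp).getD r []).length
    = (dp.getD r []).length := by
  intro L
  induction L with
  | nil => intro dp r; rfl
  | cons a L ih =>
    intro dp r
    rw [List.foldl_cons, ih, getD_set_list]
    by_cases h : r = i0 + 1 ∧ i0 + 1 < dp.length
    · rw [if_pos h, List.length_set, h.1]
    · rw [if_neg h]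

theorem val_inner (s1 s2 : List Char) (i0 : Nat) (hi0 : i0 < s1.length) :
    ∀ (k : Nat), k ≤ s2.length →
    ∀ (dp : List (List Int)),
      dp.length = s1.length + 1 →
      (∀ r, r < s1.length + 1 → (dp.getD r []).length = s2.length + 1) →
      (∀ i j, i ≤ s1.length → j ≤ s2.length → pvGet2 dp i j =
        if i ≤ i0 then Erow s1 s2 i j else if j = 0 then (i:Int) else 0) →
      ∀ i j, i ≤ s1.length → j ≤ s2.length →
        pvGet2 ((List.range k).foldl (fun dp j0 => dp.set (i0+1) ((dp.getD (i0+1) []).set (j0+1)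
          (if s1.getD (i0+1-1) ' ' = s2.getD (j0+1-1) ' ' then pvGet2 dp (i0+1-1) (j0+1-1)
           else min (pvGet2 dp (i0+1-1) (j0+1)) (min (pvGet2 dp (i0+1) (j0+1-1)) (pvGet2 dp (i0+1-1) (j0+1-1))) + 1))) dp) i j
        = if i ≤ i0 then Erow s1 s2 i j
          else if i = i0+1 ∧ j ≤ k then Erow s1 s2 i j
          else if j = 0 then (i:Int) else 0 := by
  intro k
  induction k with
  | zero =>
    intro _ dp _ _ hpre i j hi hj
    rw [List.range_zero, List.foldl_nil, hpre i j hi hj]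
    by_cases h1 : i ≤ i0
    · rw [if_pos h1, if_pos h1]
    · rw [if_neg h1, if_neg h1]
      by_cases h2 : i = i0 + 1 ∧ j ≤ 0
      · obtain ⟨hi2, hj2⟩ := h2
        have hj0 : j = 0 := Nat.le_zero.mp hj2
        subst hi2 hj0
        rw [if_pos rfl, if_pos ⟨rfl, Nat.le_refl 0⟩, Erow_zero]
        push_cast
        ring
      · rw [if_neg h2]
  | succ k ih =>
    intro hk dp hlen hrow hpre i j hi hj
    have hk' : k ≤ s2.length := by omega
    have ihv := ih hk' dp hlen hrow hpre
    have hlen' := len_foldI s1 s2 i0 (List.range k) dp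
    have hrow' := rowlen_foldI s1 s2 i0 (List.range k) dp
    have r1 := ihv i0 k (by omega) (by omega)
    rw [if_pos (Nat.le_refl i0)] at r1
    have r2 := ihv i0 (k+1) (by omega) (by omega)
    rw [if_pos (Nat.le_refl i0)] at r2
    have r3 := ihv (i0+1) k (by omega) (by omega)
    rw [if_neg (by omega), if_pos ⟨rfl, Nat.le_refl k⟩] at r3
    rw [List.range_succ, List.foldl_append, List.foldl_cons, List.foldl_nil]
    unfold pvGet2 at r1 r2 r3 ihv hlen' hrow' ⊢
    simp only [Nat.add_sub_cancel] at r1 r2 r3 ihv hlen' hrow' ⊢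
    rw [getD_set_list, hlen', hlen, r1, r2, r3]
    have hv : (if s1.getD i0 ' ' = s2.getD k ' ' then Erow s1 s2 i0 k
        else min (Erow s1 s2 i0 (k+1)) (min (Erow s1 s2 (i0+1) k) (Erow s1 s2 i0 k)) + 1)
        = Erow s1 s2 (i0+1) (k+1) := (Erow_succ_succ s1 s2 i0 k).symm
    rw [hv]
    by_cases hcase : i = i0 + 1
    · rw [if_pos ⟨hcase, by omega⟩, getD_set_int, hrow' (i0+1), hrow (i0+1) (by omega)]
      by_cases hj2 : j = k+1
      · rw [if_pos ⟨hj2, by omega⟩, if_neg (by omega), if_pos ⟨hcase, by omega⟩, hcase, hj2]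
      · rw [if_neg (by omega)]
        have r := ihv (i0+1) j (by omega) hj
        rw [r, hcase]
        split_ifs <;> first | rfl | omega
    · rw [if_neg (by omega)]
      have r := ihv i j hi hj
      rw [r]
      split_ifs <;> first | rfl | omega

theorem len_foldO (s1 s2 : List Char) : ∀ (L : List Nat) (dp : List (List Int)),
    (L.foldl (fun dp i0 => (List.range s2.length).foldl (fun dp j0 => dp.set (i0+1) ((dp.getD (i0+1) []).set (j0+1)
      (if s1.getD (i0+1-1) ' ' = s2.getD (j0+1-1) ' ' then pvGet2 dp (i0+1-1) (j0+1-1)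
       else min (pvGet2 dp (i0+1-1) (j0+1)) (min (pvGet2 dp (i0+1) (j0+1-1)) (pvGet2 dp (i0+1-1) (j0+1-1))) + 1))) dp) dp).length
    = dp.length := by
  intro L
  induction L with
  | nil => intro dp; rfl
  | cons a L ih => intro dp; rw [List.foldl_cons, ih, len_foldI]

theorem rowlen_foldO (s1 s2 : List Char) : ∀ (L : List Nat) (dp : List (List Int)) (r : Nat),
    ((L.foldl (fun dp i0 => (List.range s2.length).foldl (fun dp j0 => dp.set (i0+1) ((dp.getD (i0+1) []).set (j0+1)
      (if s1.getD (i0+1-1) ' ' = s2.getD (j0+1-1) ' ' then pvGet2 dp (i0+1-1) (j0+1-1)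
       else min (pvGet2 dp (i0+1-1) (j0+1)) (min (pvGet2 dp (i0+1) (j0+1-1)) (pvGet2 dp (i0+1-1) (j0+1-1))) + 1))) dp) dp).getD r []).length
    = (dp.getD r []).length := by
  intro L
  induction L with
  | nil => intro dp r; rfl
  | cons a L ih => intro dp r; rw [List.foldl_cons, ih, rowlen_foldI]

theorem val_outer (s1 s2 : List Char) :
    ∀ (t : Nat), t ≤ s1.length →
    ∀ (dp : List (List Int)),
      dp.length = s1.length + 1 →
      (∀ r, r < s1.length + 1 → (dp.getD r []).length = s2.length + 1) →
      (∀ i j, i ≤ s1.length → j ≤ s2.length → pvGet2 dp i j =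
        if i = 0 then (j:Int) else if j = 0 then (i:Int) else 0) →
      ∀ i j, i ≤ s1.length → j ≤ s2.length →
        pvGet2 ((List.range t).foldl (fun dp i0 => (List.range s2.length).foldl (fun dp j0 => dp.set (i0+1) ((dp.getD (i0+1) []).set (j0+1)
          (if s1.getD (i0+1-1) ' ' = s2.getD (j0+1-1) ' ' then pvGet2 dp (i0+1-1) (j0+1-1)
           else min (pvGet2 dp (i0+1-1) (j0+1)) (min (pvGet2 dp (i0+1) (j0+1-1)) (pvGet2 dp (i0+1-1) (j0+1-1))) + 1))) dp) dp) i j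
        = if i ≤ t then Erow s1 s2 i j else if j = 0 then (i:Int) else 0 := by
  intro t
  induction t with
  | zero =>
    intro _ dp _ _ hpre i j hi hj
    rw [List.range_zero, List.foldl_nil, hpre i j hi hj]
    by_cases h : i = 0
    · subst h
      rw [if_pos rfl, if_pos (Nat.le_refl 0)]
      rfl
    · rw [if_neg h, if_neg (show ¬ i ≤ 0 by omega)]
  | succ t ih =>
    intro ht dp hlen hrow hpre i j hi hj
    rw [List.range_succ, List.foldl_append, List.foldl_cons, List.foldl_nil]
    have IH := ih (by omega) dp hlen hrow hpre
    have key := val_inner s1 s2 t (by omega) s2.length (Nat.le_refl _)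
      _ (by rw [len_foldO]; exact hlen)
      (fun r hr => by rw [rowlen_foldO]; exact hrow r hr)
      IH i j hi hj
    rw [key]
    split_ifs <;> first | rfl | omega

theorem editA_eq_Erow (s1 s2 : List Char) :
    pvEditA s1 s2 = Erow s1 s2 s1.length s2.length := by
  simp only [pvEditA]
  set dp0 := List.replicate (s1.length+1) (List.replicate (s2.length+1) (0:Int)) with hdp0
  set dp1 := (List.range (s1.length+1)).foldl (fun dp i => dp.set i ((dp.getD i []).set 0 (i:Int))) dp0 with hdp1
  set dp2 := (List.range (s2.length+1)).foldl (fun dp j => dp.set 0 ((dp.getD 0 []).set j (j:Int))) dp1 with hdp2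
  have hlen0 : dp0.length = s1.length+1 := by rw [hdp0, List.length_replicate]
  have hgetD0 : ∀ r, r < s1.length+1 → dp0.getD r [] = List.replicate (s2.length+1) 0 := by
    intro r hr
    rw [hdp0, List.getD_eq_getElem?_getD, List.getElem?_replicate, if_pos hr]
    rfl
  have hlen1 : dp1.length = s1.length+1 := by rw [hdp1, len_fold1, hlen0]
  have hrow1 : ∀ r, r < s1.length+1 → dp1.getD r [] = (List.replicate (s2.length+1) 0).set 0 (r:Int) := by
    intro r hr
    rw [hdp1, val_fold1, if_pos ⟨hr, by omega⟩, hgetD0 r hr]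
  have hlen2 : dp2.length = s1.length+1 := by rw [hdp2, len_fold2, hlen1]
  have hrow2len : ∀ r, r < s1.length+1 → (dp2.getD r []).length = s2.length+1 := by
    intro r hr
    rw [hdp2, rowlen_fold2, hrow1 r hr, List.length_set, List.length_replicate]
  have hpre2 : ∀ i j, i ≤ s1.length → j ≤ s2.length → pvGet2 dp2 i j
      = if i = 0 then (j:Int) else if j = 0 then (i:Int) else 0 := by
    intro i j hi hj
    have hget1 : pvGet2 dp1 i j = if j = 0 then (i:Int) else 0 := by
      unfold pvGet2
      rw [hrow1 i (by omega), getD_set_int, List.length_replicate]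
      by_cases hj0 : j = 0
      · rw [if_pos ⟨hj0, by omega⟩, if_pos hj0]
      · rw [if_neg (fun hc => hj0 hc.1), if_neg hj0, List.getD_eq_getElem?_getD,
          List.getElem?_replicate, if_pos (by omega)]
        rfl
    rw [hdp2, val_fold2]
    by_cases hi0 : i = 0
    · rw [if_pos ⟨hi0, by omega, by omega,
        by rw [hrow1 0 (by omega), List.length_set, List.length_replicate]; omega⟩, if_pos hi0]
    · rw [if_neg (fun hc => hi0 hc.1), hget1, if_neg hi0]
  have key := val_outer s1 s2 s1.length (Nat.le_refl _) dp2 hlen2 hrow2len hpre2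
    s1.length s2.length (Nat.le_refl _) (Nat.le_refl _)
  rw [key, if_pos (Nat.le_refl _)]

-- ===== VERDICT (by name: the statement is the Claim_ definition above) =====
theorem optimize_output_py_spec : Claim_equal_optimize_output_py := by
  intro output label_set _
  show _ = _
  unfold optimize_output_py optimize_output_py_alt
  have hk : ∀ label : String, pvEditA output.toList label.toList = pvEditB output.toList label.toList := by
    intro label; rw [editA_eq_Erow, editB_eq_Erow]
  calc (label_set.foldl (fun (st : Option Int × String) label =>
          let d := pvEditA output.toList label.toList
          match st.1 with
          | none => (some d, label)
          | some md => if d < md then (some d, label) else st) (none, "")).2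
      = (label_set.foldl (fun (st : Option Int × String) label =>
          let d := pvEditB output.toList label.toList
          match st.1 with
          | none => (some d, label)
          | some md => if d < md then (some d, label) else st) (none, "")).2 := by
        simp only [hk]
    _ = PySem.List.minD label_set (fun label => pvEditB output.toList label.toList) "" :=
        scan_eq_minD label_set _
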